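-- pv_equiv track=rewrite | github.com/wilmurillo-ai/Design-Assistant | .skills/openclaw-skills/skills/atlaspa/openclaw-signet/scripts/signet.py | diff_files
-- ===== SOURCE A (Python) =====
-- def diff_files(trusted_files, current_files):
--     all_paths = set(list(trusted_files.keys()) + list(current_files.keys()))
--     modified, added, removed = [], [], []
--     for fp in sorted(all_paths):
--         old, new = trusted_files.get(fp), current_files.get(fp)
--         if old and new and old != new:
--             modified.append(fp)
--         elif new and not old:
--             added.append(fp)
--         elif old and not new:
--             removed.append(fp)
--     return modified, added, removed
-- ===== SOURCE B (Python) =====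
-- def diff_files(trusted_files, current_files):
--     modified = sorted(fp for fp in trusted_files
--                       if trusted_files.get(fp) and current_files.get(fp)
--                       and trusted_files.get(fp) != current_files.get(fp))
--     added = sorted(fp for fp in current_files
--                    if current_files.get(fp) and not trusted_files.get(fp))
--     removed = sorted(fp for fp in trusted_files
--                      if trusted_files.get(fp) and not current_files.get(fp))
--     return modified, added, removed
-- ===== Notes on version B (the rewrite author's own statement) =====
-- stated objective: simpler
-- what changed: A merges both key sets, sorts the union once and classifies each path in a single three-way branching loop; B drops the union/merged loop entirely and builds each category independently as a filtered comprehension over its own dict's keys, sorted per category.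
import Mathlib
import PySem

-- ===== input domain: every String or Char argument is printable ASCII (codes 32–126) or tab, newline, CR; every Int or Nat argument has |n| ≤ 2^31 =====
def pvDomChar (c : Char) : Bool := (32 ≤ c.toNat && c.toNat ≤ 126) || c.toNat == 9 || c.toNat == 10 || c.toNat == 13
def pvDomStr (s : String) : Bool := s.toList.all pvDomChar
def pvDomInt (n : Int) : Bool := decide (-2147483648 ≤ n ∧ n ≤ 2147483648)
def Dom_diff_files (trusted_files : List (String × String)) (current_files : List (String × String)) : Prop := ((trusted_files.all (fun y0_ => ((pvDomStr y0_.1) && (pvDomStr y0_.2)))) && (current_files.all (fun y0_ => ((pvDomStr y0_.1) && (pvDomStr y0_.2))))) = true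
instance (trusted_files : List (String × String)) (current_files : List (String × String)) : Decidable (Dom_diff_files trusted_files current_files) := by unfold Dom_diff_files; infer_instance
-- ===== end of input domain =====

-- B replaces A's single classifying pass over the sorted union of keys by three
-- independent filtered-and-sorted passes, one per category (objective: simpler decomposition).
-- dicts are assoc lists in insertion order: keys = first occurrences, lookup = first match.

-- shared Python-dict primitives (exact under the assoc-list convention)
def pyKeys (d : List (String × String)) : List String := PySem.List.dedup (d.map Prod.fst)
def pyGet (d : List (String × String)) (k : String) : Option String :=
  (d.find? (fun p => p.1 == k)).map Prod.snd
-- Python truthiness of an Optional[str]: None and "" are falsy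
def truthy (o : Option String) : Bool := match o with | none => false | some s => s ≠ ""

-- ===== PORT A =====
def diff_files (trusted_files : List (String × String)) (current_files : List (String × String)) : List String × List String × List String :=
  let all_paths := PySem.Set.ofList (pyKeys trusted_files ++ pyKeys current_files)
  (PySem.List.sorted all_paths (fun x => x) false).foldl
    (fun (acc : List String × List String × List String) fp =>
      let old := pyGet trusted_files fp
      let nw := pyGet current_files fp
      if truthy old && truthy nw && old ≠ nw then (acc.1 ++ [fp], acc.2.1, acc.2.2)
      else if truthy nw && !truthy old then (acc.1, acc.2.1 ++ [fp], acc.2.2)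
      else if truthy old && !truthy nw then (acc.1, acc.2.1, acc.2.2 ++ [fp])
      else acc)
    ([], [], [])

-- ===== PORT B =====
def diff_files_alt (trusted_files : List (String × String)) (current_files : List (String × String)) : List String × List String × List String :=
  let modified := PySem.List.sorted
    ((pyKeys trusted_files).filter (fun fp =>
      truthy (pyGet trusted_files fp) && truthy (pyGet current_files fp) &&
      pyGet trusted_files fp ≠ pyGet current_files fp)) (fun x => x) false
  let added := PySem.List.sorted
    ((pyKeys current_files).filter (fun fp =>
      truthy (pyGet current_files fp) && !truthy (pyGet trusted_files fp))) (fun x => x) false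
  let removed := PySem.List.sorted
    ((pyKeys trusted_files).filter (fun fp =>
      truthy (pyGet trusted_files fp) && !truthy (pyGet current_files fp))) (fun x => x) false
  (modified, added, removed)

-- ===== PRECONDITION & SPEC =====
def Spec_diff_files (trusted_files : List (String × String)) (current_files : List (String × String)) (out : List String × List String × List String) : Prop := out = diff_files_alt trusted_files current_files
instance (trusted_files : List (String × String)) (current_files : List (String × String)) (out : List String × List String × List String) : Decidable (Spec_diff_files trusted_files current_files out) := by unfold Spec_diff_files; infer_instance

-- ===== CLAIM (what is proved, stated in full; the proofs are below) =====
def Claim_equal_diff_files : Prop := ∀ (trusted_files : List (String × String)) (current_files : List (String × String)), Dom_diff_files trusted_files current_files → Spec_diff_files trusted_files current_files (diff_files trusted_files current_files)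

-- ===== LEMMAS AND PROOFS =====

-- a truthy lookup means the key is a key of the dict
theorem mem_pyKeys_of_truthy {d : List (String × String)} {k : String}
    (h : truthy (pyGet d k) = true) : k ∈ pyKeys d := by
  unfold pyGet at h
  rcases hf : d.find? (fun p => p.1 == k) with _ | p
  · simp [hf, truthy] at h
  · have hp := List.find?_some hf
    have hm := List.mem_of_find?_eq_some hf
    simp only [beq_iff_eq] at hp
    simp only [pyKeys, PySem.List.mem_dedup, List.mem_map]
    exact ⟨p, hm, hp⟩

-- A's classifying fold = three filters by the (mutually exclusive) branch guards
theorem foldl_classify (t c : List (String × String)) (L : List String)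
    (m a r : List String) :
    L.foldl (fun (acc : List String × List String × List String) fp =>
      let old := pyGet t fp
      let nw := pyGet c fp
      if truthy old && truthy nw && old ≠ nw then (acc.1 ++ [fp], acc.2.1, acc.2.2)
      else if truthy nw && !truthy old then (acc.1, acc.2.1 ++ [fp], acc.2.2)
      else if truthy old && !truthy nw then (acc.1, acc.2.1, acc.2.2 ++ [fp])
      else acc) (m, a, r)
    = (m ++ L.filter (fun fp => truthy (pyGet t fp) && truthy (pyGet c fp) && pyGet t fp ≠ pyGet c fp),
       a ++ L.filter (fun fp => truthy (pyGet c fp) && !truthy (pyGet t fp)),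
       r ++ L.filter (fun fp => truthy (pyGet t fp) && !truthy (pyGet c fp))) := by
  induction L generalizing m a r with
  | nil => simp
  | cons x xs ih =>
    simp only [List.foldl_cons, List.filter_cons]
    rw [ih]
    cases ho : truthy (pyGet t x) <;> cases hn : truthy (pyGet c x) <;>
      by_cases he : pyGet t x = pyGet c x <;>
      simp [ho, hn, he]

-- filtering a sorted list = sorting the filtered list
theorem filter_sorted (xs : List String) (p : String → Bool) :
    (PySem.List.sorted xs (fun x => x) false).filter p
      = PySem.List.sorted (xs.filter p) (fun x => x) false := by
  refine (PySem.List.sorted_id_eq_of_perm_of_pairwise _ _ ?_ ?_).symm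
  · exact (PySem.List.sorted_perm xs (fun x => x) false).filter p
  · exact List.Pairwise.sublist List.filter_sublist (PySem.List.sorted_pairwise xs (fun x => x))

-- two nodup filtered lists with the same membership have equal sorts
theorem sorted_filter_congr (xs ys : List String) (p q : String → Bool)
    (hx : xs.Nodup) (hy : ys.Nodup)
    (h : ∀ z, (z ∈ xs ∧ p z = true) ↔ (z ∈ ys ∧ q z = true)) :
    PySem.List.sorted (xs.filter p) (fun x => x) false
      = PySem.List.sorted (ys.filter q) (fun x => x) false := by
  rw [PySem.List.sorted_id_eq_sorted_id_iff_perm]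
  rw [List.perm_ext_iff_of_nodup (hx.filter p) (hy.filter q)]
  intro z
  simp only [List.mem_filter]
  exact h z

theorem nodup_pyKeys (d : List (String × String)) : (pyKeys d).Nodup :=
  PySem.List.nodup_dedup _

-- ===== VERDICT (by name: the statement is the Claim_ definition above) =====
theorem diff_files_spec : Claim_equal_diff_files := by
  intro t c _
  unfold Spec_diff_files diff_files diff_files_alt
  simp only [foldl_classify, List.nil_append, filter_sorted]
  have hAP : (PySem.Set.ofList (pyKeys t ++ pyKeys c)).Nodup := PySem.Set.nodup_ofList _
  have hmemAP : ∀ z, z ∈ PySem.Set.ofList (pyKeys t ++ pyKeys c) ↔ (z ∈ pyKeys t ∨ z ∈ pyKeys c) := by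
    intro z; rw [PySem.Set.mem_ofList]; exact List.mem_append
  simp only [Prod.mk.injEq]
  refine ⟨?_, ?_, ?_⟩
  · apply sorted_filter_congr _ _ _ _ hAP (nodup_pyKeys t)
    intro z
    constructor
    · rintro ⟨_, hp⟩
      refine ⟨?_, hp⟩
      simp only [Bool.and_eq_true] at hp
      exact mem_pyKeys_of_truthy hp.1.1
    · rintro ⟨hz, hp⟩
      exact ⟨(hmemAP z).2 (Or.inl hz), hp⟩
  · apply sorted_filter_congr _ _ _ _ hAP (nodup_pyKeys c)
    intro z
    constructor
    · rintro ⟨_, hp⟩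
      refine ⟨?_, hp⟩
      simp only [Bool.and_eq_true] at hp
      exact mem_pyKeys_of_truthy hp.1
    · rintro ⟨hz, hp⟩
      exact ⟨(hmemAP z).2 (Or.inr hz), hp⟩
  · apply sorted_filter_congr _ _ _ _ hAP (nodup_pyKeys t)
    intro z
    constructor
    · rintro ⟨_, hp⟩
      refine ⟨?_, hp⟩
      simp only [Bool.and_eq_true] at hp
      exact mem_pyKeys_of_truthy hp.1
    · rintro ⟨hz, hp⟩
      exact ⟨(hmemAP z).2 (Or.inl hz), hp⟩
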